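-- pv_equiv track=rewrite | github.com/xxcj-sh/vive-agent-backend | app/services/feed_service.py | _mix_feed_cards
-- ===== SOURCE A (Python) =====
-- from typing import Optional, List, Dict, Any, Set, Tuple
--
-- def _mix_feed_cards(cards: List[Dict[str, Any]], page_size: int) -> List[Dict[str, Any]]:
--     """
--     混合推荐卡片
--
--     策略：
--     1. 分离用户卡片和话题/投票卡片
--     2. 按照 2:1 的比例交替排列
--     3. 用户卡片优先展示
--
--     Args:
--         cards: 原始卡片列表
--         page_size: 每页数量
--
--     Returns:
--         混合排序后的卡片列表
--     """
--     if not cards: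
--         return []
--
--     # 分离卡片类型
--     user_cards = [c for c in cards if c.get("card_type") == "user" or c.get("scene_type") == "social"]
--     topic_cards = [c for c in cards if c.get("card_type") == "topic" or c.get("scene_type") in ["topic", "vote"]]
--
--     # 合并话题和投票卡片
--     topic_vote_cards = topic_cards
--
--     # 优先保留用户卡片
--     user_ratio = 2
--     topic_ratio = 1
--     batch_size = user_ratio + topic_ratio
--
--     # 计算每批应该保留的卡片数量
--     max_user_cards = min(len(user_cards), page_size * 2)
--     max_topic_cards = min(len(topic_vote_cards), page_size)
--
--     selected_user = user_cards[:max_user_cards]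
--     selected_topic = topic_vote_cards[:max_topic_cards]
--
--     # 混合排序：2 个用户卡片 + 1 个话题卡片交替
--     mixed = []
--     user_idx = 0
--     topic_idx = 0
--
--     while user_idx < len(selected_user) or topic_idx < len(selected_topic):
--         # 添加用户卡片（最多 2 个）
--         for _ in range(user_ratio):
--             if user_idx < len(selected_user):
--                 mixed.append(selected_user[user_idx])
--                 user_idx += 1
--
--         # 添加话题/投票卡片（1 个）
--         if topic_idx < len(selected_topic):
--             mixed.append(selected_topic[topic_idx])
--             topic_idx += 1
--
--     return mixed
-- ===== SOURCE B (Python) =====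
-- from itertools import zip_longest
--
--
-- def _pairs(xs):
--     """Chunk xs into consecutive pairs (last chunk may be a singleton)."""
--     return ([xs[:2]] + _pairs(xs[2:])) if xs else []
--
--
-- def _mix_feed_cards(cards, page_size):
--     if not cards:
--         return []
--
--     user_cards = [c for c in cards if c.get("card_type") == "user" or c.get("scene_type") == "social"]
--     topic_cards = [c for c in cards if c.get("card_type") == "topic" or c.get("scene_type") in ["topic", "vote"]]
--
--     selected_user = user_cards[:min(len(user_cards), page_size * 2)]
--     selected_topic = topic_cards[:min(len(topic_cards), page_size)]
--
--     return [card
--             for pair, single in zip_longest(_pairs(selected_user),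
--                                             ([t] for t in selected_topic),
--                                             fillvalue=[])
--             for card in list(pair) + list(single)]
-- ===== Notes on version B (the rewrite author's own statement) =====
-- stated objective: idiomatic
-- what changed: The index-driven while loop with user_idx/topic_idx counters is replaced by chunking the selected user cards into consecutive pairs and flattening them against per-topic singletons with itertools.zip_longest(fillvalue=[]), which drains the longer side automatically.
import Mathlib
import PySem

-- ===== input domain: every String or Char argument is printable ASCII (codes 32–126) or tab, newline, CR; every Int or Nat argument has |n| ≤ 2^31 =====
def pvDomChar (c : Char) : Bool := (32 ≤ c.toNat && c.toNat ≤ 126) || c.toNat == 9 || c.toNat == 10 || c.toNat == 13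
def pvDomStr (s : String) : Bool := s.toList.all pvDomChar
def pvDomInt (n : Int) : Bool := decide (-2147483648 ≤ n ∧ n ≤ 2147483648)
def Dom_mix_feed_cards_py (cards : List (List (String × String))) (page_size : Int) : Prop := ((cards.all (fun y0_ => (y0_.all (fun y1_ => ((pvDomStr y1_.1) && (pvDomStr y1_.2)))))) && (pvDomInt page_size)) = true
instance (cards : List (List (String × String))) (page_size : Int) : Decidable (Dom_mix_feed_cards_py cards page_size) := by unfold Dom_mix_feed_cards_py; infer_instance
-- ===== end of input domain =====

-- B replaces A's index-driven 2:1 interleaving while-loop by pair-chunking + zip_longest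
-- flattening (idiomatic); the partition/cap step is shared and the return value is identical.

-- ===== PORT A =====
-- dict.get(k) on a card (assoc list, first match)
def pvGet (c : List (String × String)) (k : String) : Option String :=
  PySem.Dict.get? (PySem.Dict.mk c) k

def pvIsUser (c : List (String × String)) : Bool :=
  (pvGet c "card_type" == some "user") || (pvGet c "scene_type" == some "social")

def pvIsTopic (c : List (String × String)) : Bool :=
  (pvGet c "card_type" == some "topic") ||
  (pvGet c "scene_type" == some "topic" || pvGet c "scene_type" == some "vote")

-- A's while loop over (user_idx, topic_idx, mixed); the two inner `if`s are the unrolled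
-- `for _ in range(user_ratio)` with user_ratio = 2.
def pvMixLoop (su st : List (List (String × String))) :
    Nat → Nat → Nat → List (List (String × String)) → List (List (String × String))
  | 0, _, _, mixed => mixed   -- fuel only (never reached: fuel bounds the loop's trip count)
  | fuel + 1, ui, ti, mixed =>
    if ui < su.length ∨ ti < st.length then
      let m1 := if ui < su.length then mixed ++ [su.getD ui []] else mixed
      let u1 := if ui < su.length then ui + 1 else ui
      let m2 := if u1 < su.length then m1 ++ [su.getD u1 []] else m1
      let u2 := if u1 < su.length then u1 + 1 else u1
      let m3 := if ti < st.length then m2 ++ [st.getD ti []] else m2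
      let t1 := if ti < st.length then ti + 1 else ti
      pvMixLoop su st fuel u2 t1 m3
    else mixed

def mix_feed_cards_py (cards : List (List (String × String))) (page_size : Int) :
    List (List (String × String)) :=
  if cards.isEmpty then []
  else
    let user_cards := cards.filter pvIsUser
    let topic_cards := cards.filter pvIsTopic
    let topic_vote_cards := topic_cards
    let max_user_cards : Int := min (user_cards.length : Int) (page_size * 2)
    let max_topic_cards : Int := min (topic_vote_cards.length : Int) page_size
    let selected_user := PySem.List.slice user_cards none (some max_user_cards)
    let selected_topic := PySem.List.slice topic_vote_cards none (some max_topic_cards)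
    pvMixLoop selected_user selected_topic (selected_user.length + selected_topic.length) 0 0 []

-- ===== PORT B =====
-- _pairs(xs) = [xs[:2]] + _pairs(xs[2:]) if xs else []   (fuel = len xs bounds the recursion depth)
def pvPairsF : Nat → List (List (String × String)) → List (List (List (String × String)))
  | 0, _ => []
  | fuel + 1, xs =>
    if xs.isEmpty then []
    else PySem.List.slice xs none (some 2) :: pvPairsF fuel (PySem.List.slice xs (some 2) none)

def pvPairs (xs : List (List (String × String))) : List (List (List (String × String))) :=
  pvPairsF xs.length xs

-- itertools.zip_longest(ps, ss, fillvalue=[])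
def pvZipLongest (ps ss : List (List (List (String × String)))) :
    List (List (List (String × String)) × List (List (String × String))) :=
  match ps, ss with
  | [], [] => []
  | p :: ps', [] => (p, []) :: pvZipLongest ps' []
  | [], s :: ss' => ([], s) :: pvZipLongest [] ss'
  | p :: ps', s :: ss' => (p, s) :: pvZipLongest ps' ss'

def mix_feed_cards_py_alt (cards : List (List (String × String))) (page_size : Int) :
    List (List (String × String)) :=
  if cards.isEmpty then []
  else
    let user_cards := cards.filter pvIsUser
    let topic_cards := cards.filter pvIsTopic
    let selected_user := PySem.List.slice user_cards none (some (min (user_cards.length : Int) (page_size * 2)))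
    let selected_topic := PySem.List.slice topic_cards none (some (min (topic_cards.length : Int) page_size))
    (pvZipLongest (pvPairs selected_user) (selected_topic.map (fun t => [t]))).flatMap
      (fun q => q.1 ++ q.2)

-- ===== PRECONDITION & SPEC =====
def Spec_mix_feed_cards_py (cards : List (List (String × String))) (page_size : Int) (out : List (List (String × String))) : Prop := out = mix_feed_cards_py_alt cards page_size
instance (cards : List (List (String × String))) (page_size : Int) (out : List (List (String × String))) : Decidable (Spec_mix_feed_cards_py cards page_size out) := by unfold Spec_mix_feed_cards_py; infer_instance

-- ===== CLAIM (what is proved, stated in full; the proofs are below) =====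
def Claim_equal_mix_feed_cards_py : Prop := ∀ (cards : List (List (String × String))) (page_size : Int), Dom_mix_feed_cards_py cards page_size → Spec_mix_feed_cards_py cards page_size (mix_feed_cards_py cards page_size)

-- ===== LEMMAS AND PROOFS =====

-- B's mixing phase as a function of the two selected lists
def pvB (su st : List (List (String × String))) : List (List (String × String)) :=
  (pvZipLongest (pvPairs su) (st.map (fun t => [t]))).flatMap (fun q => q.1 ++ q.2)

lemma pvPairsF_nil (fuel : Nat) : pvPairsF fuel [] = [] := by
  cases fuel <;> simp [pvPairsF]

-- one spare unit of fuel is irrelevant once fuel ≥ length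
lemma pvPairsF_succ : ∀ (n : Nat) (xs : List (List (String × String))), xs.length ≤ n →
    pvPairsF (n + 1) xs = pvPairsF n xs := by
  intro n
  induction n using Nat.strong_induction_on with
  | _ n ih =>
    intro xs hlen
    cases xs with
    | nil => simp [pvPairsF_nil]
    | cons a t =>
      obtain ⟨m, rfl⟩ : ∃ m, n = m + 1 := ⟨n - 1, by simp at hlen; omega⟩
      conv_lhs => rw [pvPairsF]
      conv_rhs => rw [pvPairsF]
      rw [PySem.List.slice_from _ (by omega : (0:Int) ≤ 2)]
      have hd : (List.drop (Int.toNat 2) (a :: t)).length ≤ m := by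
        simp only [List.length_drop, List.length_cons]
        simp only [List.length_cons] at hlen
        omega
      rw [ih m (by omega) _ hd]

lemma pvPairs_nil : pvPairs [] = [] := by simp [pvPairs, pvPairsF_nil]

lemma pvPairs_single (a : List (String × String)) : pvPairs [a] = [[a]] := by
  show pvPairsF 1 [a] = [[a]]
  rw [pvPairsF]
  rw [PySem.List.slice_to _ (by omega : (0:Int) ≤ 2),
      PySem.List.slice_from _ (by omega : (0:Int) ≤ 2)]
  simp [pvPairsF]

lemma pvPairs_cons2 (a b : List (String × String)) (u' : List (List (String × String))) :
    pvPairs (a :: b :: u') = [a, b] :: pvPairs u' := by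
  simp only [pvPairs, List.length_cons]
  rw [pvPairsF]
  rw [PySem.List.slice_to _ (by omega : (0:Int) ≤ 2),
      PySem.List.slice_from _ (by omega : (0:Int) ≤ 2)]
  have h := pvPairsF_succ u'.length u' (le_refl _)
  simp [h]

lemma pvB_nil (st : List (List (String × String))) : pvB [] st = st := by
  induction st with
  | nil => simp [pvB, pvPairs_nil, pvZipLongest]
  | cons c st' ih =>
      simp only [pvB, pvPairs_nil, List.map_cons, pvZipLongest, List.flatMap_cons] at *
      simpa using ih

lemma pvB_single (a : List (String × String)) (st : List (List (String × String))) :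
    pvB [a] st = a :: st := by
  cases st with
  | nil => simp [pvB, pvPairs_single, pvZipLongest]
  | cons c st' =>
      have h := pvB_nil st'
      simp only [pvB, pvPairs_nil, pvPairs_single, List.map_cons, pvZipLongest,
        List.flatMap_cons] at *
      simp [h]

lemma pvB_cons2_nil (a b : List (String × String)) (u' : List (List (String × String))) :
    pvB (a :: b :: u') [] = a :: b :: pvB u' [] := by
  simp only [pvB, pvPairs_cons2, List.map_nil]
  cases hp : pvPairs u' with
  | nil => simp [pvZipLongest]
  | cons p ps' => simp [pvZipLongest]

lemma pvB_cons2_cons (a b : List (String × String)) (u' : List (List (String × String)))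
    (c : List (String × String)) (st' : List (List (String × String))) :
    pvB (a :: b :: u') (c :: st') = a :: b :: c :: pvB u' st' := by
  simp [pvB, pvPairs_cons2, pvZipLongest]

lemma mixLoop_eq : ∀ (fuel : Nat) (su st : List (List (String × String))) (ui ti : Nat)
    (mixed : List (List (String × String))),
    (su.length - ui) + (st.length - ti) ≤ fuel →
    pvMixLoop su st fuel ui ti mixed = mixed ++ pvB (su.drop ui) (st.drop ti) := by
  intro fuel
  induction fuel with
  | zero =>
    intro su st ui ti mixed hn
    rw [List.drop_eq_nil_of_le (by omega), List.drop_eq_nil_of_le (by omega)]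
    simp [pvMixLoop, pvB_nil]
  | succ fuel ih =>
    intro su st ui ti mixed hn
    rw [pvMixLoop]
    by_cases hc : ui < su.length ∨ ti < st.length
    · rw [if_pos hc]
      by_cases h1 : ui < su.length
      · by_cases h2 : ui + 1 < su.length
        · -- two user cards taken this round
          have hdu : su.drop ui = su[ui] :: su[ui+1] :: su.drop (ui+2) := by
            rw [List.drop_eq_getElem_cons h1, List.drop_eq_getElem_cons h2]
          by_cases h3 : ti < st.length
          · have hdt : st.drop ti = st[ti] :: st.drop (ti+1) := List.drop_eq_getElem_cons h3
            simp only [if_pos h1, if_pos h2, if_pos h3]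
            rw [ih su st _ _ _ (by omega)]
            rw [hdu, hdt, pvB_cons2_cons]
            simp [List.getD_eq_getElem?_getD, h1, h2, h3]
          · have hdt : st.drop ti = [] := List.drop_eq_nil_of_le (by omega)
            simp only [if_pos h1, if_pos h2, if_neg h3]
            rw [ih su st _ _ _ (by omega)]
            rw [hdu, hdt, pvB_cons2_nil]
            simp [List.getD_eq_getElem?_getD, h1, h2]
        · -- exactly one user card left
          have hdu : su.drop ui = [su[ui]] := by
            rw [List.drop_eq_getElem_cons h1, List.drop_eq_nil_of_le (by omega)]
          by_cases h3 : ti < st.length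
          · have hdt : st.drop ti = st[ti] :: st.drop (ti+1) := List.drop_eq_getElem_cons h3
            simp only [if_pos h1, if_neg h2, if_pos h3]
            have hdu1 : su.drop (ui+1) = [] := List.drop_eq_nil_of_le (by omega)
            rw [ih su st _ _ _ (by omega)]
            rw [hdu1, pvB_nil, hdu, hdt, pvB_single]
            simp [List.getD_eq_getElem?_getD, h1, h3]
          · have hdt : st.drop ti = [] := List.drop_eq_nil_of_le (by omega)
            simp only [if_pos h1, if_neg h2, if_neg h3]
            have hdu1 : su.drop (ui+1) = [] := List.drop_eq_nil_of_le (by omega)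
            rw [ih su st _ _ _ (by omega)]
            rw [hdu1, pvB_nil, hdu, hdt, pvB_single]
            simp [List.getD_eq_getElem?_getD, h1]
      · -- no user cards left, one topic card
        have h3 : ti < st.length := by omega
        have hdu : su.drop ui = [] := List.drop_eq_nil_of_le (by omega)
        have hdt : st.drop ti = st[ti] :: st.drop (ti+1) := List.drop_eq_getElem_cons h3
        simp only [if_neg h1, if_pos h3]
        rw [ih su st _ _ _ (by omega)]
        rw [hdu, hdt, pvB_nil, pvB_nil]
        simp [List.getD_eq_getElem?_getD, h3]
    · rw [if_neg hc]
      rw [List.drop_eq_nil_of_le (by omega), List.drop_eq_nil_of_le (by omega)]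
      simp [pvB_nil]

-- ===== VERDICT (by name: the statement is the Claim_ definition above) =====
theorem mix_feed_cards_py_spec : Claim_equal_mix_feed_cards_py := by
  intro cards page_size _
  unfold Spec_mix_feed_cards_py mix_feed_cards_py mix_feed_cards_py_alt
  by_cases h : cards.isEmpty
  · simp [h]
  · simp only [if_neg h]
    rw [mixLoop_eq _ _ _ 0 0 [] (by omega)]
    simp [pvB]
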